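-- pv_equiv track=rewrite | github.com/sandeepkumar8713/pythonapps | secondFolder/27_closest_pair.py | bfs
-- ===== SOURCE A (Python) =====
-- def bfs(grid):
--     from collections import deque
--     q, visited = deque(), set()
--     dirs = [(1, 0), (-1, 0), (0, 1), (0, -1)]
--
--     # Insert all Xs into the queue
--     for i in range(len(grid)):
--         for j in range(len(grid[0])):
--             if grid[i][j] == 'X':
--                 # (position, distance)
--                 q.append(((i, j), 0))
--                 visited.add((i, j))
--
--     while q:
--         for _ in range(len(q)):
--             (row, col), dist = q.popleft()
--             if grid[row][col] == 'Y':
--                 return dist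
--
--             for dir in dirs:
--                 new_pos = (new_r, new_c) = row + dir[0], col + dir[1]
--                 if new_r < 0 or new_c < 0 or new_r >= len(grid) or new_c >= len(grid[0]) or new_pos in visited:
--                     continue
--                 q.append((new_pos, dist + 1))
--                 visited.add(new_pos)
--
--     # Can't reach Y
--     return -1
-- ===== SOURCE B (Python) =====
-- def bfs(grid):
--     # With no obstacles, grid distance = Manhattan distance, so the answer is
--     # the minimum |xi-yi|+|xj-yj| over all (X, Y) cell pairs (no search needed).
--     if not grid:
--         return -1
--     w = len(grid[0])
--     xs, ys = [], []
--     for i in range(len(grid)):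
--         for j in range(w):
--             ch = grid[i][j]
--             if ch == 'X':
--                 xs.append((i, j))
--             elif ch == 'Y':
--                 ys.append((i, j))
--     if not xs or not ys:
--         return -1
--     return min(abs(xi - yi) + abs(xj - yj) for (xi, xj) in xs for (yi, yj) in ys)
-- ===== Notes on version B (the rewrite author's own statement) =====
-- stated objective: alternative
-- what changed: Replaces the multi-source BFS (deque + visited set, layer-by-layer flood of the grid) by a closed form: collect the X and Y coordinates in one scan and return the minimum Manhattan distance over all (X,Y) pairs, which equals the BFS distance because the grid has no obstacles.
import Mathlib
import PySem

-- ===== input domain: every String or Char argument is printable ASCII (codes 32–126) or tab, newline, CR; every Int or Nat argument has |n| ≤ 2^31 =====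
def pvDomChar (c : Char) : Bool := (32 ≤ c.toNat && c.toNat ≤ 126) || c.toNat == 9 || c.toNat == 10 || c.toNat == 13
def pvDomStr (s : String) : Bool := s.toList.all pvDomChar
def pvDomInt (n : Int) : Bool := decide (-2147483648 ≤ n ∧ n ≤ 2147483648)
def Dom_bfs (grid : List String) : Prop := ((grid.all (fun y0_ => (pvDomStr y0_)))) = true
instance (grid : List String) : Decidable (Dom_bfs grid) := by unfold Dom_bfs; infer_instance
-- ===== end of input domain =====

-- B replaces A's multi-source BFS with the closed-form minimum Manhattan distance over all (X,Y)
-- cell pairs (exact because the grid has no obstacles).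

-- ===== PORT A =====
-- grid[i][j]: every access A performs is bounds-checked (indices nonnegative and < len) before use,
-- so under Pre_bfs this default-valued accessor is exact.
def pvCellOf (g : List (List Char)) (p : Int × Int) : Char :=
  (g.getD p.1.toNat []).getD p.2.toNat ' '

def pvDirs : List (Int × Int) := [(1, 0), (-1, 0), (0, 1), (0, -1)]

-- for i in range(len(grid)): for j in range(len(grid[0])): if 'X': append to q, add to visited
def pvScanA (g : List (List Char)) (w : Nat) :
    List ((Int × Int) × Int) × PySem.Set (Int × Int) :=
  (List.range g.length).foldl (fun acc i =>
    (List.range w).foldl (fun acc j =>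
      if pvCellOf g ((i.cast : Int), (j.cast : Int)) = 'X' then
        (acc.1 ++ [(((i.cast : Int), (j.cast : Int)), 0)], PySem.Set.add acc.2 ((i.cast : Int), (j.cast : Int)))
      else acc) acc) ([], PySem.Set.empty)

-- the 'for dir in dirs' loop of A (append to queue / visited unless out of bounds or visited)
def pvPush (hh ww : Int) (q : List ((Int × Int) × Int)) (v : PySem.Set (Int × Int))
    (r c d : Int) : List ((Int × Int) × Int) × PySem.Set (Int × Int) :=
  pvDirs.foldl (fun acc dir =>
    if r + dir.1 < 0 ∨ c + dir.2 < 0 ∨ r + dir.1 ≥ hh ∨ c + dir.2 ≥ ww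
        ∨ (r + dir.1, c + dir.2) ∈ acc.2 then acc
    else (acc.1 ++ [((r + dir.1, c + dir.2), d + 1)],
          PySem.Set.add acc.2 (r + dir.1, c + dir.2))) (q, v)

-- the 'for _ in range(len(q))' loop: pops n items from the front, may return early (Sum.inl dist)
def pvInner (g : List (List Char)) (hh ww : Int) :
    Nat → List ((Int × Int) × Int) → PySem.Set (Int × Int) →
    Sum Int (List ((Int × Int) × Int) × PySem.Set (Int × Int))
  | 0, q, v => Sum.inr (q, v)
  | _ + 1, [], v => Sum.inr ([], v)      -- unreachable: A pops exactly len(q) ≤ length items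
  | n + 1, (p, d) :: rest, v =>
    if pvCellOf g p = 'Y' then Sum.inl d
    else
      let s := pvPush hh ww rest v p.1 p.2 d
      pvInner g hh ww n s.1 s.2

-- the 'while q:' loop; the fuel only makes the loop total and is proved never to run out
def pvLoop (g : List (List Char)) (hh ww : Int) :
    Nat → List ((Int × Int) × Int) → PySem.Set (Int × Int) → Int
  | 0, _, _ => -1
  | f + 1, q, v =>
    if q = [] then -1
    else match pvInner g hh ww q.length q v with
      | Sum.inl d => d
      | Sum.inr s => pvLoop g hh ww f s.1 s.2

def bfs (grid : List String) : Int :=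
  let g := grid.map String.toList
  let w := (g.headD []).length
  let s := pvScanA g w
  pvLoop g (g.length : Int) (w : Int) (g.length + w + 2) s.1 s.2

-- ===== PORT B =====
def pvMd (p q : Int × Int) : Int := |p.1 - q.1| + |p.2 - q.2|

-- one pass collecting the X cells and the Y cells
def pvScanB (g : List (List Char)) (w : Nat) :
    List (Int × Int) × List (Int × Int) :=
  (List.range g.length).foldl (fun acc i =>
    (List.range w).foldl (fun acc j =>
      if pvCellOf g ((i.cast : Int), (j.cast : Int)) = 'X' then
        (acc.1 ++ [((i.cast : Int), (j.cast : Int))], acc.2)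
      else if pvCellOf g ((i.cast : Int), (j.cast : Int)) = 'Y' then
        (acc.1, acc.2 ++ [((i.cast : Int), (j.cast : Int))])
      else acc) acc) ([], [])

def bfs_alt (grid : List String) : Int :=
  if grid = [] then -1
  else
    let g := grid.map String.toList
    let s := pvScanB g (g.headD []).length
    if s.1 = [] ∨ s.2 = [] then -1
    else
      match s.1.flatMap (fun x => s.2.map (fun y => pvMd x y)) with
      | [] => -1                        -- unreachable: both lists are nonempty
      | d :: rest => rest.foldl min d   -- min() of the nonempty generator

-- ===== PRECONDITION & SPEC =====
-- Pre_ excludes jagged grids having a row shorter than row 0: there Python A raises IndexError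
-- (and Python B raises too); rows longer than row 0 are fine (both ignore the extra columns).
def Pre_bfs (grid : List String) : Prop :=
  ∀ s ∈ grid, (grid.headD "").toList.length ≤ s.toList.length
instance (grid : List String) : Decidable (Pre_bfs grid) := by unfold Pre_bfs; infer_instance

def pvWitness_bfs : List String := ["X..", ".Y."]

def Spec_bfs (grid : List String) (out : Int) : Prop := out = bfs_alt grid
instance (grid : List String) (out : Int) : Decidable (Spec_bfs grid out) := by unfold Spec_bfs; infer_instance

-- ===== CLAIM (what is proved, stated in full; the proofs are below) =====
def Claim_equal_bfs : Prop := ∀ (grid : List String), Dom_bfs grid → Pre_bfs grid → Spec_bfs grid (bfs grid)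

-- ===== LEMMAS AND PROOFS =====

-- ---- proof helpers: geometry of the obstacle-free grid ----

def pvInG (hh ww : Int) (p : Int × Int) : Prop :=
  0 ≤ p.1 ∧ p.1 < hh ∧ 0 ≤ p.2 ∧ p.2 < ww

def pvMinD (l : List Int) : Int :=
  match l with
  | [] => -1
  | a :: t => t.foldl min a

def pvDist (xs : List (Int × Int)) (p : Int × Int) : Int :=
  pvMinD (xs.map (fun x => pvMd p x))

def pvAllCells (n w : Nat) : List (Int × Int) :=
  (List.range n).flatMap (fun i => (List.range w).map (fun j => ((i.cast : Int), (j.cast : Int))))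

def pvXs (g : List (List Char)) (w : Nat) : List (Int × Int) :=
  (pvAllCells g.length w).filter (fun p => pvCellOf g p == 'X')

def pvYs (g : List (List Char)) (w : Nat) : List (Int × Int) :=
  (pvAllCells g.length w).filter (fun p => pvCellOf g p == 'Y')

lemma pvMinD_le {l : List Int} {b : Int} (h : b ∈ l) : pvMinD l ≤ b := by
  cases l with
  | nil => cases h
  | cons a t =>
    rcases List.mem_cons.mp h with rfl | hb
    · exact (PySem.List.foldl_min_le t b).1
    · exact (PySem.List.foldl_min_le t a).2 b hb

lemma pvMinD_mem {l : List Int} (h : l ≠ []) : pvMinD l ∈ l := by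
  cases l with
  | nil => exact absurd rfl h
  | cons a t =>
    rcases PySem.List.foldl_min_mem t a with h' | h'
    · exact List.mem_cons.mpr (Or.inl h')
    · exact List.mem_cons.mpr (Or.inr h')

lemma pvMinD_eq {l : List Int} {a : Int} (ha : a ∈ l) (hle : ∀ b ∈ l, a ≤ b) :
    pvMinD l = a :=
  le_antisymm (pvMinD_le ha) (hle _ (pvMinD_mem (List.ne_nil_of_mem ha)))

lemma pvMd_comm (p q : Int × Int) : pvMd p q = pvMd q p := by
  simp [pvMd, abs_sub_comm]

lemma pvMd_nonneg (p q : Int × Int) : 0 ≤ pvMd p q :=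
  add_nonneg (abs_nonneg _) (abs_nonneg _)

lemma pvMd_self (p : Int × Int) : pvMd p p = 0 := by simp [pvMd]

lemma pvMd_eq_zero {p q : Int × Int} (h : pvMd p q = 0) : p = q := by
  obtain ⟨a, b⟩ := p; obtain ⟨c, e⟩ := q
  unfold pvMd at h
  have h1 := abs_nonneg (a - c); have h2 := abs_nonneg (b - e)
  simp only at h
  have e1 : |a - c| = 0 := by linarith
  have e2 : |b - e| = 0 := by linarith
  have := sub_eq_zero.mp (abs_eq_zero.mp e1)
  have := sub_eq_zero.mp (abs_eq_zero.mp e2)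
  simp_all

lemma pvMd_triangle (u v x : Int × Int) : pvMd u x ≤ pvMd u v + pvMd v x := by
  have t1 := abs_sub_le u.1 v.1 x.1
  have t2 := abs_sub_le u.2 v.2 x.2
  unfold pvMd; linarith

lemma pvMd_dir_le_one {dir : Int × Int} (hdir : dir ∈ pvDirs) (q : Int × Int) :
    pvMd (q.1 + dir.1, q.2 + dir.2) q ≤ 1 := by
  obtain ⟨a, b⟩ := q
  simp only [pvDirs, List.mem_cons, List.not_mem_nil, or_false] at hdir
  rcases hdir with rfl | rfl | rfl | rfl <;>
    simp [pvMd, add_sub_cancel_left]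

lemma pvDist_le {xs : List (Int × Int)} {x : Int × Int} (p : Int × Int) (hx : x ∈ xs) :
    pvDist xs p ≤ pvMd p x :=
  pvMinD_le (List.mem_map_of_mem hx)

lemma pvDist_mem {xs : List (Int × Int)} (h : xs ≠ []) (p : Int × Int) :
    ∃ x ∈ xs, pvDist xs p = pvMd p x := by
  have hm := pvMinD_mem (l := xs.map (fun x => pvMd p x)) (by simpa using h)
  rcases List.mem_map.mp hm with ⟨x, hx, he⟩
  exact ⟨x, hx, he.symm⟩

lemma pvDist_nonneg {xs : List (Int × Int)} (h : xs ≠ []) (p : Int × Int) :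
    0 ≤ pvDist xs p := by
  obtain ⟨x, _, he⟩ := pvDist_mem h p
  rw [he]; exact pvMd_nonneg p x

lemma pvDist_of_mem {xs : List (Int × Int)} {p : Int × Int} (hp : p ∈ xs) :
    pvDist xs p = 0 :=
  le_antisymm (by simpa [pvMd_self] using pvDist_le p hp)
    (pvDist_nonneg (List.ne_nil_of_mem hp) p)

lemma pvDist_zero_mem {xs : List (Int × Int)} {p : Int × Int} (h : xs ≠ [])
    (hd : pvDist xs p = 0) : p ∈ xs := by
  obtain ⟨x, hx, he⟩ := pvDist_mem h p
  have : pvMd p x = 0 := by rw [← he, hd]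
  rwa [pvMd_eq_zero this]

lemma pvDist_adj {xs : List (Int × Int)} (hxs : xs ≠ []) {dir : Int × Int}
    (hdir : dir ∈ pvDirs) (q : Int × Int) :
    pvDist xs (q.1 + dir.1, q.2 + dir.2) ≤ pvDist xs q + 1 := by
  obtain ⟨x, hx, he⟩ := pvDist_mem hxs q
  have h2 := pvDist_le (xs := xs) (q.1 + dir.1, q.2 + dir.2) hx
  have h3 := pvMd_triangle (q.1 + dir.1, q.2 + dir.2) q x
  have h4 := pvMd_dir_le_one hdir q
  linarith

lemma pvMd_bound {hh ww : Int} {p x : Int × Int} (hp : pvInG hh ww p)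
    (hx : pvInG hh ww x) : pvMd p x ≤ hh + ww - 2 := by
  obtain ⟨a, b⟩ := p; obtain ⟨c, e⟩ := x
  obtain ⟨h1, h2, h3, h4⟩ := hp; obtain ⟨h5, h6, h7, h8⟩ := hx
  simp only at h1 h2 h3 h4 h5 h6 h7 h8
  unfold pvMd; simp only
  rcases abs_cases (a - c) with ⟨u1, _⟩ | ⟨u1, _⟩ <;>
    rcases abs_cases (b - e) with ⟨w1, _⟩ | ⟨w1, _⟩ <;> rw [u1, w1] <;> linarith

lemma pvDist_bound {hh ww : Int} {xs : List (Int × Int)} (hxs : xs ≠ [])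
    (hsub : ∀ x ∈ xs, pvInG hh ww x) {p : Int × Int} (hp : pvInG hh ww p) :
    pvDist xs p ≤ hh + ww - 2 := by
  obtain ⟨x, hx, he⟩ := pvDist_mem hxs p
  rw [he]; exact pvMd_bound hp (hsub x hx)

-- a cell at distance e+1 has an in-grid neighbour at distance e (a step toward a nearest X)
lemma pvGeo {hh ww : Int} {xs : List (Int × Int)} (hxs : xs ≠ [])
    (hsub : ∀ x ∈ xs, pvInG hh ww x) {p : Int × Int} (hp : pvInG hh ww p)
    {e : Int} (he0 : 0 ≤ e) (he : pvDist xs p = e + 1) :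
    ∃ q, pvInG hh ww q ∧ pvDist xs q = e ∧
      ∃ dir ∈ pvDirs, p = (q.1 + dir.1, q.2 + dir.2) := by
  obtain ⟨x, hxmem, hmd⟩ := pvDist_mem hxs p
  rw [he] at hmd
  have hxin := hsub x hxmem
  obtain ⟨a, b⟩ := p; obtain ⟨c, f⟩ := x
  obtain ⟨h1, h2, h3, h4⟩ := hp; obtain ⟨h5, h6, h7, h8⟩ := hxin
  simp only at h1 h2 h3 h4 h5 h6 h7 h8
  unfold pvMd at hmd; simp only at hmd
  have habs1 := abs_nonneg (a - c); have habs2 := abs_nonneg (b - f)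
  rcases lt_trichotomy a c with hac | hac | hac
  · -- move down: q = (a+1, b), p = q + (-1, 0)
    refine ⟨(a + 1, b), ⟨by simp; omega, by simp; omega, by simp; omega, by simp; omega⟩, ?_,
      (-1, 0), by simp [pvDirs], by simp⟩
    have hle : pvDist xs (a + 1, b) ≤ e := by
      have h := pvDist_le (xs := xs) (a + 1, b) hxmem
      have e1 : |a - c| = -(a - c) := abs_of_neg (by omega)
      have e2 : |a + 1 - c| = -(a + 1 - c) := abs_of_nonpos (by omega)
      unfold pvMd at h; simp only at h
      rw [e2] at h; rw [e1] at hmd; linarith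
    have hge : e ≤ pvDist xs (a + 1, b) := by
      have h := pvDist_adj hxs (show ((-1 : Int), (0 : Int)) ∈ pvDirs by simp [pvDirs]) (a + 1, b)
      simp only at h
      rw [show a + 1 + -1 = a from by ring, show b + 0 = b from by ring] at h
      linarith [h, he]
    omega
  · -- same row: move within the column
    subst hac
    rw [show a - a = 0 from by ring, abs_zero, zero_add] at hmd
    rcases lt_trichotomy b f with hbf | hbf | hbf
    · refine ⟨(a, b + 1), ⟨by simp; omega, by simp; omega, by simp; omega, by simp; omega⟩, ?_,
        (0, -1), by simp [pvDirs], by simp⟩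
      have hle : pvDist xs (a, b + 1) ≤ e := by
        have h := pvDist_le (xs := xs) (a, b + 1) hxmem
        have e1 : |b - f| = -(b - f) := abs_of_neg (by omega)
        have e2 : |b + 1 - f| = -(b + 1 - f) := abs_of_nonpos (by omega)
        unfold pvMd at h; simp only at h
        rw [e2] at h; rw [e1] at hmd
        have e3 : |a - a| = 0 := by simp
        rw [e3] at h; linarith
      have hge : e ≤ pvDist xs (a, b + 1) := by
        have h := pvDist_adj hxs (show ((0 : Int), (-1 : Int)) ∈ pvDirs by simp [pvDirs]) (a, b + 1)
        simp only at h
        rw [show a + 0 = a from by ring, show b + 1 + -1 = b from by ring] at h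
        linarith [h, he]
      omega
    · exfalso; rw [show b - f = 0 from by omega, abs_zero] at hmd; omega
    · refine ⟨(a, b - 1), ⟨by simp; omega, by simp; omega, by simp; omega, by simp; omega⟩, ?_,
        (0, 1), by simp [pvDirs], by simp⟩
      have hle : pvDist xs (a, b - 1) ≤ e := by
        have h := pvDist_le (xs := xs) (a, b - 1) hxmem
        have e1 : |b - f| = b - f := abs_of_pos (by omega)
        have e2 : |b - 1 - f| = b - 1 - f := abs_of_nonneg (by omega)
        unfold pvMd at h; simp only at h
        rw [e2] at h; rw [e1] at hmd
        have e3 : |a - a| = 0 := by simp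
        rw [e3] at h; linarith
      have hge : e ≤ pvDist xs (a, b - 1) := by
        have h := pvDist_adj hxs (show ((0 : Int), (1 : Int)) ∈ pvDirs by simp [pvDirs]) (a, b - 1)
        simp only at h
        rw [show a + 0 = a from by ring, show b - 1 + 1 = b from by ring] at h
        linarith [h, he]
      omega
  · -- move up: q = (a-1, b), p = q + (1, 0)
    refine ⟨(a - 1, b), ⟨by simp; omega, by simp; omega, by simp; omega, by simp; omega⟩, ?_,
      (1, 0), by simp [pvDirs], by simp⟩
    have hle : pvDist xs (a - 1, b) ≤ e := by
      have h := pvDist_le (xs := xs) (a - 1, b) hxmem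
      have e1 : |a - c| = a - c := abs_of_pos (by omega)
      have e2 : |a - 1 - c| = a - 1 - c := abs_of_nonneg (by omega)
      unfold pvMd at h; simp only at h
      rw [e2] at h; rw [e1] at hmd; linarith
    have hge : e ≤ pvDist xs (a - 1, b) := by
      have h := pvDist_adj hxs (show ((1 : Int), (0 : Int)) ∈ pvDirs by simp [pvDirs]) (a - 1, b)
      simp only at h
      rw [show a - 1 + 1 = a from by ring, show b + 0 = b from by ring] at h
      linarith [h, he]
    omega

lemma pvDescent {hh ww : Int} {xs : List (Int × Int)} (hxs : xs ≠ [])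
    (hsub : ∀ x ∈ xs, pvInG hh ww x) :
    ∀ (k : Nat) (d : Int), 0 ≤ d →
      (∃ p, pvInG hh ww p ∧ pvDist xs p = d + k) →
      ∃ p, pvInG hh ww p ∧ pvDist xs p = d := by
  intro k
  induction k with
  | zero => intro d _ h; simpa using h
  | succ k ih =>
    intro d hd ⟨p, hp, hdist⟩
    have : pvDist xs p = (d + k) + 1 := by rw [hdist]; push_cast; ring
    obtain ⟨q, hq, hqd, _⟩ := pvGeo hxs hsub hp (by omega) this
    exact ih d hd ⟨q, hq, hqd⟩

lemma pvNestedFoldl {γ : Type} (n w : Nat) (F : γ → (Int × Int) → γ) (init : γ) :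
    (List.range n).foldl (fun acc i =>
      (List.range w).foldl (fun acc j => F acc ((i.cast : Int), (j.cast : Int))) acc) init
    = (pvAllCells n w).foldl F init := by
  unfold pvAllCells
  rw [List.foldl_flatMap]
  congr 1
  funext acc i
  rw [List.foldl_map]

lemma pvMem_allCells {n w : Nat} {p : Int × Int} :
    p ∈ pvAllCells n w ↔ pvInG (n : Int) (w : Int) p := by
  obtain ⟨a, b⟩ := p
  constructor
  · intro h
    obtain ⟨i, hi, hp⟩ := List.mem_flatMap.mp h
    obtain ⟨j, hj, he⟩ := List.mem_map.mp hp
    have h1 := List.mem_range.mp hi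
    have h2 := List.mem_range.mp hj
    obtain ⟨e1, e2⟩ := Prod.mk.injEq .. ▸ he
    unfold pvInG
    refine ⟨?_, ?_, ?_, ?_⟩ <;> omega
  · intro h
    obtain ⟨e1, e2, e3, e4⟩ := h
    refine List.mem_flatMap.mpr ⟨a.toNat, List.mem_range.mpr (by omega),
      List.mem_map.mpr ⟨b.toNat, List.mem_range.mpr (by omega), ?_⟩⟩
    rw [Int.toNat_of_nonneg e1, Int.toNat_of_nonneg e3]

lemma pvMem_pvXs {g : List (List Char)} {w : Nat} {p : Int × Int} :
    p ∈ pvXs g w ↔ pvInG (g.length : Int) (w : Int) p ∧ pvCellOf g p = 'X' := by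
  simp [pvXs, List.mem_filter, pvMem_allCells]

lemma pvMem_pvYs {g : List (List Char)} {w : Nat} {p : Int × Int} :
    p ∈ pvYs g w ↔ pvInG (g.length : Int) (w : Int) p ∧ pvCellOf g p = 'Y' := by
  simp [pvYs, List.mem_filter, pvMem_allCells]

lemma pvScanB_accum (g : List (List Char)) :
    ∀ (ps : List (Int × Int)) (acc : List (Int × Int) × List (Int × Int)),
    ps.foldl (fun acc p =>
        if pvCellOf g p = 'X' then (acc.1 ++ [p], acc.2)
        else if pvCellOf g p = 'Y' then (acc.1, acc.2 ++ [p])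
        else acc) acc
      = (acc.1 ++ ps.filter (fun p => pvCellOf g p == 'X'),
         acc.2 ++ ps.filter (fun p => pvCellOf g p == 'Y')) := by
  intro ps
  induction ps with
  | nil => intro acc; simp
  | cons p ps ih =>
    intro acc
    simp only [List.foldl_cons]
    by_cases hX : pvCellOf g p = 'X'
    · rw [if_pos hX, ih]
      simp [hX]
    · by_cases hYc : pvCellOf g p = 'Y'
      · rw [if_neg hX, if_pos hYc, ih]
        simp [hYc]
      · rw [if_neg hX, if_neg hYc, ih]
        simp [hX, hYc]

lemma pvScanB_eq (g : List (List Char)) (w : Nat) :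
    pvScanB g w = (pvXs g w, pvYs g w) := by
  unfold pvScanB
  have h := pvNestedFoldl g.length w (fun acc p =>
      if pvCellOf g p = 'X' then (acc.1 ++ [p], acc.2)
      else if pvCellOf g p = 'Y' then (acc.1, acc.2 ++ [p])
      else acc) (([], []) : List (Int × Int) × List (Int × Int))
  rw [h, pvScanB_accum]
  simp [pvXs, pvYs]

lemma pvScanA_accum (g : List (List Char)) :
    ∀ (ps : List (Int × Int)) (acc : List ((Int × Int) × Int) × PySem.Set (Int × Int)),
    ps.foldl (fun acc p =>
        if pvCellOf g p = 'X' then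
          (acc.1 ++ [(p, (0 : Int))], PySem.Set.add acc.2 p)
        else acc) acc
      = (acc.1 ++ (ps.filter (fun p => pvCellOf g p == 'X')).map (fun p => (p, (0 : Int))),
         PySem.Set.update acc.2 (ps.filter (fun p => pvCellOf g p == 'X'))) := by
  intro ps
  induction ps with
  | nil => intro acc; simp [PySem.Set.update]
  | cons p ps ih =>
    intro acc
    simp only [List.foldl_cons]
    by_cases hX : pvCellOf g p = 'X'
    · rw [if_pos hX, ih]
      simp [hX, PySem.Set.update]
    · rw [if_neg hX, ih]
      simp [hX]

lemma pvScanA_eq (g : List (List Char)) (w : Nat) :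
    pvScanA g w = ((pvXs g w).map (fun p => (p, (0 : Int))), PySem.Set.ofList (pvXs g w)) := by
  unfold pvScanA
  have h := pvNestedFoldl g.length w (fun acc p =>
      if pvCellOf g p = 'X' then
        (acc.1 ++ [(p, (0 : Int))], PySem.Set.add acc.2 p)
      else acc) (([], PySem.Set.empty) : List ((Int × Int) × Int) × PySem.Set (Int × Int))
  rw [h, pvScanA_accum]
  simp [pvXs, PySem.Set.update, PySem.Set.ofList, PySem.Set.empty]

lemma pvInG_mk {hh ww a b : Int} :
    pvInG hh ww (a, b) ↔ (0 ≤ a ∧ a < hh ∧ 0 ≤ b ∧ b < ww) := Iff.rfl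

lemma pvPushAux_spec (hh ww r c d : Int) :
    ∀ (ds : List (Int × Int)) (q : List ((Int × Int) × Int)) (v : PySem.Set (Int × Int)),
    ∃ ps : List (Int × Int),
      ds.foldl (fun acc dir =>
        if r + dir.1 < 0 ∨ c + dir.2 < 0 ∨ r + dir.1 ≥ hh ∨ c + dir.2 ≥ ww
            ∨ (r + dir.1, c + dir.2) ∈ acc.2 then acc
        else (acc.1 ++ [((r + dir.1, c + dir.2), d + 1)],
              PySem.Set.add acc.2 (r + dir.1, c + dir.2))) (q, v)
        = (q ++ ps.map (fun p => (p, d + 1)), v ++ ps)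
      ∧ (∀ p ∈ ps, p ∉ v) ∧ ps.Nodup
      ∧ (∀ p ∈ ps, pvInG hh ww p ∧ ∃ dir ∈ ds, p = (r + dir.1, c + dir.2))
      ∧ (∀ dir ∈ ds, pvInG hh ww (r + dir.1, c + dir.2) → (r + dir.1, c + dir.2) ∈ v ++ ps) := by
  intro ds
  induction ds with
  | nil =>
    intro q v
    exact ⟨[], by simp, by simp, List.nodup_nil, by simp, by simp⟩
  | cons dir ds ih =>
    intro q v
    simp only [List.foldl_cons]
    by_cases hc : r + dir.1 < 0 ∨ c + dir.2 < 0 ∨ r + dir.1 ≥ hh ∨ c + dir.2 ≥ ww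
        ∨ (r + dir.1, c + dir.2) ∈ v
    · rw [if_pos hc]
      obtain ⟨ps, heq, hnotv, hnd, hprop, hcomp⟩ := ih q v
      refine ⟨ps, heq, hnotv, hnd, ?_, ?_⟩
      · intro p hp
        obtain ⟨hin, dir', hd', he⟩ := hprop p hp
        exact ⟨hin, dir', List.mem_cons_of_mem _ hd', he⟩
      · intro dir' hdir' hin
        rcases List.mem_cons.mp hdir' with rfl | hd'
        · have hv : (r + dir'.1, c + dir'.2) ∈ v := by
            rw [pvInG_mk] at hin
            rcases hc with h | h | h | h | h
            · omega
            · omega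
            · omega
            · omega
            · exact h
          exact List.mem_append_left _ hv
        · exact hcomp dir' hd' hin
    · rw [if_neg hc]
      push_neg at hc
      obtain ⟨h1, h2, h3, h4, h5⟩ := hc
      rw [PySem.Set.add_of_not_mem h5]
      obtain ⟨ps, heq, hnotv, hnd, hprop, hcomp⟩ :=
        ih (q ++ [((r + dir.1, c + dir.2), d + 1)]) (v ++ [(r + dir.1, c + dir.2)])
      refine ⟨(r + dir.1, c + dir.2) :: ps, ?_, ?_, ?_, ?_, ?_⟩
      · rw [heq]
        simp [List.append_assoc]
      · intro p hp
        rcases List.mem_cons.mp hp with rfl | hp'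
        · exact h5
        · intro hpv; exact hnotv p hp' (List.mem_append_left _ hpv)
      · refine List.nodup_cons.mpr ⟨?_, hnd⟩
        intro hmem
        exact hnotv _ hmem (List.mem_append_right _ (List.mem_singleton.mpr rfl))
      · intro p hp
        rcases List.mem_cons.mp hp with rfl | hp'
        · exact ⟨by rw [pvInG_mk]; omega, dir, List.mem_cons_self .., rfl⟩
        · obtain ⟨hin, dir', hd', he⟩ := hprop p hp'
          exact ⟨hin, dir', List.mem_cons_of_mem _ hd', he⟩
      · intro dir' hdir' hin
        rcases List.mem_cons.mp hdir' with rfl | hd'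
        · exact List.mem_append_right _ (List.mem_cons_self ..)
        · have := hcomp dir' hd' hin
          simpa [List.append_assoc] using this

lemma pvInner_spec (g : List (List Char)) (hh ww : Int) (xs : List (Int × Int))
    (hxs : xs ≠ []) (d : Int) :
    ∀ (layer extra : List ((Int × Int) × Int)) (v : PySem.Set (Int × Int)),
    (∀ e ∈ layer, e.2 = d ∧ pvInG hh ww e.1 ∧ pvDist xs e.1 = d) →
    (∀ e ∈ extra, e.2 = d + 1 ∧ pvInG hh ww e.1 ∧ pvDist xs e.1 = d + 1) →
    (∀ p, p ∈ v ↔ ((pvInG hh ww p ∧ pvDist xs p ≤ d) ∨ p ∈ extra.map Prod.fst)) →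
    v.Nodup →
    ((∃ e ∈ layer, pvCellOf g e.1 = 'Y') →
        pvInner g hh ww layer.length (layer ++ extra) v = Sum.inl d)
    ∧ ((∀ e ∈ layer, pvCellOf g e.1 ≠ 'Y') →
        ∃ extra' v',
          pvInner g hh ww layer.length (layer ++ extra) v = Sum.inr (extra', v')
          ∧ (∀ e ∈ extra', e.2 = d + 1 ∧ pvInG hh ww e.1 ∧ pvDist xs e.1 = d + 1)
          ∧ (∀ p, p ∈ v' ↔ ((pvInG hh ww p ∧ pvDist xs p ≤ d) ∨ p ∈ extra'.map Prod.fst))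
          ∧ v'.Nodup
          ∧ (∀ e ∈ extra, e ∈ extra')
          ∧ (∀ p, pvInG hh ww p → pvDist xs p = d + 1 →
                (∃ e ∈ layer, ∃ dir ∈ pvDirs, p = (e.1.1 + dir.1, e.1.2 + dir.2)) →
                p ∈ extra'.map Prod.fst)) := by
  intro layer
  induction layer with
  | nil =>
    intro extra v _ hex hv hvnd
    constructor
    · rintro ⟨e, he, _⟩; cases he
    · intro _
      refine ⟨extra, v, ?_, hex, hv, hvnd, fun e he => he, ?_⟩
      · simp [pvInner]
      · rintro p _ _ ⟨e, he, _⟩; cases he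
  | cons e0 rest ih =>
    intro extra v hlay hex hv hvnd
    obtain ⟨p0, d0⟩ := e0
    obtain ⟨hd0, hp0in, hp0dist⟩ := hlay (p0, d0) (List.mem_cons_self ..)
    subst hd0
    by_cases hY : pvCellOf g p0 = 'Y'
    · constructor
      · intro _
        simp only [List.length_cons, List.cons_append]
        simp [pvInner, hY]
      · intro hno
        exact absurd hY (hno (p0, d0) (List.mem_cons_self ..))
    · -- process p0: push its unvisited in-grid neighbours
      obtain ⟨ps, heq, hnotv, hnd, hprop, hcomp⟩ :=
        pvPushAux_spec hh ww p0.1 p0.2 d0 pvDirs (rest ++ extra) v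
      have hpush : pvPush hh ww (rest ++ extra) v p0.1 p0.2 d0
          = ((rest ++ extra) ++ ps.map (fun p => (p, d0 + 1)), v ++ ps) := heq
      -- facts about the pushed cells
      have hps : ∀ p ∈ ps, pvInG hh ww p ∧ pvDist xs p = d0 + 1 := by
        intro p hp
        obtain ⟨hin, dir, hdir, hpe⟩ := hprop p hp
        have hub : pvDist xs p ≤ d0 + 1 := by
          have h := pvDist_adj hxs hdir (p0.1, p0.2)
          simp only at h
          rw [← hpe] at h
          have : pvDist xs (p0.1, p0.2) = d0 := by
            rw [show ((p0.1, p0.2) : Int × Int) = p0 from rfl]; exact hp0dist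
          rw [this] at h
          exact h
        have hlb : ¬ (pvInG hh ww p ∧ pvDist xs p ≤ d0) := by
          intro hball
          exact hnotv p hp ((hv p).mpr (Or.inl hball))
        have : ¬ pvDist xs p ≤ d0 := fun hle => hlb ⟨hin, hle⟩
        exact ⟨hin, by omega⟩
      set extra2 : List ((Int × Int) × Int) := extra ++ ps.map (fun p => (p, d0 + 1)) with hextra2
      have hex2 : ∀ e ∈ extra2, e.2 = d0 + 1 ∧ pvInG hh ww e.1 ∧ pvDist xs e.1 = d0 + 1 := by
        intro e he
        rcases List.mem_append.mp he with h | h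
        · exact hex e h
        · obtain ⟨p, hp, rfl⟩ := List.mem_map.mp h
          obtain ⟨hin, hdist⟩ := hps p hp
          exact ⟨rfl, hin, hdist⟩
      have hfst2 : extra2.map Prod.fst = extra.map Prod.fst ++ ps := by
        simp [hextra2, List.map_map, Function.comp_def]
      have hv2 : ∀ p, p ∈ v ++ ps ↔
          ((pvInG hh ww p ∧ pvDist xs p ≤ d0) ∨ p ∈ extra2.map Prod.fst) := by
        intro p
        rw [hfst2]
        simp only [List.mem_append]
        rw [hv p]
        tauto
      have hvnd2 : (v ++ ps).Nodup :=
        List.Nodup.append hvnd hnd (fun a ha hb => hnotv a hb ha)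
      have hred : ∀ (vv : PySem.Set (Int × Int)),
          pvInner g hh ww ((p0, d0) :: rest).length (((p0, d0) :: rest) ++ extra) vv
          = (if pvCellOf g p0 = 'Y' then Sum.inl d0
             else
               let s := pvPush hh ww (rest ++ extra) vv p0.1 p0.2 d0
               pvInner g hh ww rest.length s.1 s.2) := by
        intro vv
        simp only [List.length_cons, List.cons_append]
        rw [pvInner]
      obtain ⟨ih1, ih2⟩ := ih extra2 (v ++ ps)
        (fun e he => hlay e (List.mem_cons_of_mem _ he)) hex2 hv2 hvnd2
      have hqshape : (rest ++ extra) ++ ps.map (fun p => (p, d0 + 1)) = rest ++ extra2 := by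
        rw [hextra2, List.append_assoc]
      constructor
      · rintro ⟨e, he, hecell⟩
        rcases List.mem_cons.mp he with rfl | he'
        · exact absurd hecell hY
        · rw [hred v, if_neg hY]
          simp only [hpush, hqshape]
          exact ih1 ⟨e, he', hecell⟩
      · intro hno
        have hno' : ∀ e ∈ rest, pvCellOf g e.1 ≠ 'Y' :=
          fun e he => hno e (List.mem_cons_of_mem _ he)
        obtain ⟨extra', v', hres, ha, hb, hc', hmono, hcompl⟩ := ih2 hno'
        refine ⟨extra', v', ?_, ha, hb, hc', ?_, ?_⟩
        · rw [hred v, if_neg hY]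
          simp only [hpush, hqshape]
          exact hres
        · intro e he
          exact hmono e (List.mem_append_left _ he)
        · intro p hpin hpdist hadj
          obtain ⟨e, he, dir, hdir, hpe⟩ := hadj
          rcases List.mem_cons.mp he with rfl | he'
          · -- neighbour of the popped cell: it is in v ++ ps after the push
            have hinv2 : p ∈ v ++ ps := by
              have := hcomp dir hdir (by rw [← hpe]; exact hpin)
              rw [← hpe] at this
              exact this
            have := (hv2 p).mp hinv2
            rcases this with hball | hfst
            · omega
            · obtain ⟨e2, he2, rfl⟩ := List.mem_map.mp hfst
              exact List.mem_map.mpr ⟨e2, hmono e2 he2, rfl⟩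
          · exact hcompl p hpin hpdist ⟨e, he', dir, hdir, hpe⟩

lemma pvLoop_spec (g : List (List Char)) (hh ww : Int) (xs ys : List (Int × Int))
    (hxs : xs ≠ []) (hxsub : ∀ x ∈ xs, pvInG hh ww x)
    (hys : ∀ p, p ∈ ys ↔ (pvInG hh ww p ∧ pvCellOf g p = 'Y')) :
    ∀ (fuel : Nat) (d : Int) (q : List ((Int × Int) × Int)) (v : PySem.Set (Int × Int)),
    0 ≤ d → hh + ww ≤ d + fuel →
    (∀ e ∈ q, e.2 = d ∧ pvInG hh ww e.1 ∧ pvDist xs e.1 = d) →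
    (∀ p, pvInG hh ww p → pvDist xs p = d → (p, d) ∈ q) →
    (∀ p, p ∈ v ↔ (pvInG hh ww p ∧ pvDist xs p ≤ d)) →
    v.Nodup →
    (∀ y ∈ ys, d ≤ pvDist xs y) →
    pvLoop g hh ww fuel q v
      = (if ys = [] then -1 else pvMinD (ys.map (fun y => pvDist xs y))) := by
  intro fuel
  induction fuel with
  | zero =>
    intro d q v hd hfuel hq hqc hv hvnd hyd
    have hysnil : ys = [] := by
      by_contra hne
      obtain ⟨y, hy⟩ := List.exists_mem_of_ne_nil ys hne
      have hyin := (hys y).mp hy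
      have hb := pvDist_bound hxs hxsub hyin.1
      have hyd' := hyd y hy
      push_cast at hfuel
      omega
    simp [pvLoop, hysnil]
  | succ f ihf =>
    intro d q v hd hfuel hq hqc hv hvnd hyd
    by_cases hqe : q = []
    · subst hqe
      have hysnil : ys = [] := by
        by_contra hne
        obtain ⟨y, hy⟩ := List.exists_mem_of_ne_nil ys hne
        have hyin := (hys y).mp hy
        have hyd' := hyd y hy
        have hk : pvDist xs y = d + ((pvDist xs y - d).toNat : Int) := by
          rw [Int.toNat_of_nonneg (by omega)]; ring
        obtain ⟨p, hp, hpd⟩ :=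
          pvDescent hxs hxsub (pvDist xs y - d).toNat d hd ⟨y, hyin.1, hk⟩
        have := hqc p hp hpd
        simp at this
      simp [pvLoop, hysnil]
    · have hspec := pvInner_spec g hh ww xs hxs d q [] v hq (by simp)
        (by intro p; rw [hv p]; simp) hvnd
      rw [List.append_nil] at hspec
      obtain ⟨hinl, hinr⟩ := hspec
      by_cases hY : ∃ e ∈ q, pvCellOf g e.1 = 'Y'
      · have hstep : pvLoop g hh ww (f + 1) q v = d := by
          simp only [pvLoop]
          rw [if_neg hqe, hinl hY]
        rw [hstep]
        obtain ⟨e, he, hecell⟩ := hY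
        have hey : e.1 ∈ ys := (hys e.1).mpr ⟨(hq e he).2.1, hecell⟩
        rw [if_neg (List.ne_nil_of_mem hey)]
        have hmem : d ∈ ys.map (fun y => pvDist xs y) :=
          List.mem_map.mpr ⟨e.1, hey, (hq e he).2.2⟩
        refine (pvMinD_eq hmem ?_).symm
        rintro b hb
        obtain ⟨y, hy, rfl⟩ := List.mem_map.mp hb
        exact hyd y hy
      · have hno : ∀ e ∈ q, pvCellOf g e.1 ≠ 'Y' := fun e he hc => hY ⟨e, he, hc⟩
        obtain ⟨extra', v', hres, ha, hb, hc', _, hcompl⟩ := hinr hno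
        have hstep : pvLoop g hh ww (f + 1) q v = pvLoop g hh ww f extra' v' := by
          simp only [pvLoop]
          rw [if_neg hqe, hres]
        rw [hstep]
        have hyd' : ∀ y ∈ ys, d + 1 ≤ pvDist xs y := by
          intro y hy
          have h1 := hyd y hy
          have hyin := (hys y).mp hy
          by_contra hlt
          have heqd : pvDist xs y = d := by omega
          exact hno (y, d) (hqc y hyin.1 heqd) hyin.2
        have hqc' : ∀ p, pvInG hh ww p → pvDist xs p = d + 1 → (p, d + 1) ∈ extra' := by
          intro p hp hpd
          obtain ⟨q0, hq0in, hq0d, dir, hdir, hpe⟩ := pvGeo hxs hxsub hp hd hpd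
          have hq0mem := hqc q0 hq0in hq0d
          have hfst := hcompl p hp hpd ⟨(q0, d), hq0mem, dir, hdir, by simpa using hpe⟩
          obtain ⟨e2, he2, hfe⟩ := List.mem_map.mp hfst
          have he2' : e2 = (p, d + 1) := by
            have hsnd := (ha e2 he2).1
            obtain ⟨e2a, e2b⟩ := e2
            simp only at hfe hsnd
            rw [hfe, hsnd]
          rwa [he2'] at he2
        have hv2 : ∀ p, p ∈ v' ↔ (pvInG hh ww p ∧ pvDist xs p ≤ d + 1) := by
          intro p
          rw [hb p]
          constructor
          · rintro (⟨h1, h2⟩ | hf)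
            · exact ⟨h1, by omega⟩
            · obtain ⟨e2, he2, rfl⟩ := List.mem_map.mp hf
              obtain ⟨_, hin, hdd⟩ := ha e2 he2
              exact ⟨hin, by omega⟩
          · rintro ⟨h1, h2⟩
            by_cases hle : pvDist xs p ≤ d
            · exact Or.inl ⟨h1, hle⟩
            · have hde : pvDist xs p = d + 1 := by omega
              exact Or.inr (List.mem_map.mpr ⟨(p, d + 1), hqc' p h1 hde, rfl⟩)
        refine ihf (d + 1) extra' v' (by omega) ?_ ha
          (fun p hp hpd => hqc' p hp hpd) hv2 hc' hyd'
        push_cast at hfuel ⊢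
        omega

lemma pvMinExchange (xs ys : List (Int × Int)) (hxs : xs ≠ []) (hys : ys ≠ []) :
    pvMinD (xs.flatMap (fun x => ys.map (fun y => pvMd x y)))
      = pvMinD (ys.map (fun y => pvDist xs y)) := by
  obtain ⟨x0, hx0⟩ := List.exists_mem_of_ne_nil xs hxs
  obtain ⟨y0, hy0⟩ := List.exists_mem_of_ne_nil ys hys
  have hLne : xs.flatMap (fun x => ys.map (fun y => pvMd x y)) ≠ [] :=
    List.ne_nil_of_mem (List.mem_flatMap.mpr ⟨x0, hx0, List.mem_map.mpr ⟨y0, hy0, rfl⟩⟩)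
  have hRne : ys.map (fun y => pvDist xs y) ≠ [] := by simpa using hys
  apply le_antisymm
  · obtain ⟨y, hy, he⟩ := List.mem_map.mp (pvMinD_mem hRne)
    obtain ⟨x, hx, he2⟩ := pvDist_mem hxs y
    have h3 := pvMinD_le (l := xs.flatMap (fun x => ys.map (fun y => pvMd x y)))
      (b := pvMd x y) (List.mem_flatMap.mpr ⟨x, hx, List.mem_map.mpr ⟨y, hy, rfl⟩⟩)
    calc pvMinD (xs.flatMap (fun x => ys.map (fun y => pvMd x y))) ≤ pvMd x y := h3
      _ = pvMd y x := pvMd_comm x y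
      _ = pvDist xs y := he2.symm
      _ = pvMinD (ys.map (fun y => pvDist xs y)) := he
  · obtain ⟨x, hx, hin⟩ := List.mem_flatMap.mp (pvMinD_mem hLne)
    obtain ⟨y, hy, he⟩ := List.mem_map.mp hin
    have h2 := pvMinD_le (List.mem_map.mpr ⟨y, hy, rfl⟩ :
      pvDist xs y ∈ ys.map (fun y => pvDist xs y))
    have h3 := pvDist_le (xs := xs) y hx
    calc pvMinD (ys.map (fun y => pvDist xs y)) ≤ pvDist xs y := h2
      _ ≤ pvMd y x := h3
      _ = pvMd x y := pvMd_comm y x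
      _ = pvMinD (xs.flatMap (fun x => ys.map (fun y => pvMd x y))) := he

lemma pvMain (g : List (List Char)) (w : Nat) :
    pvLoop g (g.length : Int) (w : Int)
      (g.length + w + 2)
      (pvScanA g w).1 (pvScanA g w).2
    = (if g = [] then -1
       else if pvXs g w = [] ∨ pvYs g w = [] then -1
       else match (pvXs g w).flatMap
              (fun x => (pvYs g w).map (fun y => pvMd x y)) with
            | [] => -1
            | d :: rest => rest.foldl min d) := by
  have hmdef : ∀ l : List Int,
      (match l with | [] => (-1 : Int) | d :: rest => rest.foldl min d) = pvMinD l := by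
    intro l; cases l <;> rfl
  rw [pvScanA_eq]
  by_cases hxe : pvXs g w = []
  · rw [hxe]
    have hloop : pvLoop g (g.length : Int) (w : Int)
        (g.length + w + 2)
        (([] : List (Int × Int)).map (fun p => (p, (0 : Int)))) (PySem.Set.ofList []) = -1 := by
      simp [pvLoop]
    rw [hloop]
    by_cases hge : g = [] <;> simp [hge]
  · have hge : g ≠ [] := by
      obtain ⟨x, hx⟩ := List.exists_mem_of_ne_nil _ hxe
      have hin := (pvMem_pvXs.mp hx).1
      intro h
      rw [h] at hin
      obtain ⟨h1, h2, _⟩ := hin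
      simp at h2
      omega
    have hxsub : ∀ x ∈ pvXs g w,
        pvInG (g.length : Int) (w : Int) x :=
      fun x hx => (pvMem_pvXs.mp hx).1
    have happ := pvLoop_spec g (g.length : Int) (w : Int)
      (pvXs g w) (pvYs g w) hxe hxsub
      (fun p => pvMem_pvYs)
      (g.length + w + 2) 0
      ((pvXs g w).map (fun p => (p, (0 : Int))))
      (PySem.Set.ofList (pvXs g w))
      le_rfl
      (by push_cast; omega)
      (by
        intro e he
        obtain ⟨x, hx, rfl⟩ := List.mem_map.mp he
        exact ⟨rfl, hxsub x hx, pvDist_of_mem hx⟩)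
      (fun p hp hpd => List.mem_map.mpr ⟨p, pvDist_zero_mem hxe hpd, rfl⟩)
      (by
        intro p
        rw [PySem.Set.mem_ofList]
        constructor
        · intro hp
          exact ⟨hxsub p hp, by rw [pvDist_of_mem hp]⟩
        · rintro ⟨hin, hle⟩
          have := pvDist_nonneg hxe p
          exact pvDist_zero_mem hxe (by omega))
      (PySem.Set.nodup_ofList _)
      (fun y _ => pvDist_nonneg hxe y)
    rw [happ, if_neg hge]
    by_cases hye : pvYs g w = []
    · simp [hye, hxe]
    · rw [if_neg hye, if_neg (by simp [hxe, hye]), hmdef]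
      exact (pvMinExchange _ _ hxe hye).symm

theorem bfs_total (grid : List String) : bfs grid = bfs_alt grid := by
  by_cases hgq : grid = []
  · subst hgq; rfl
  · have hgm : grid.map String.toList ≠ [] := by simpa using hgq
    have hm := pvMain (grid.map String.toList) ((grid.map String.toList).headD []).length
    rw [if_neg hgm] at hm
    refine Eq.trans hm ?_
    simp only [bfs_alt, if_neg hgq, pvScanB_eq]

-- ===== VERDICT (by name: the statement is the Claim_ definition above) =====
theorem bfs_spec : Claim_equal_bfs := by
  intro grid _ _
  exact bfs_total grid
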